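-- pv_equiv track=rewrite | github.com/TataSatyaPratheek/tennis | src/tennis/calibration/keypoint_detector.py | _find_court_corners_relaxed
-- ===== SOURCE A (Python) =====
-- from typing import List, Dict, Tuple, Optional, Any
--
-- def _find_court_corners_relaxed(intersections: List[Tuple[int, int]],
--                                frame_shape: Tuple[int, ...]) -> List[Tuple[int, int]]:
--     """Find court corners with relaxed criteria"""
--     if len(intersections) < 2:
--         return intersections
--
--     h, w = frame_shape[:2]
--
--     # If we have enough intersections, try to find corners in quadrants
--     if len(intersections) >= 4:
--         corners = []
--         quadrants = [(0, w//2, 0, h//2), (w//2, w, 0, h//2),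
--                     (0, w//2, h//2, h), (w//2, w, h//2, h)]
--
--         for x_min, x_max, y_min, y_max in quadrants:
--             quadrant_points = [(x, y) for x, y in intersections
--                              if x_min <= x < x_max and y_min <= y < y_max]
--
--             if quadrant_points:
--                 # Use the point closest to the quadrant corner
--                 if x_min == 0 and y_min == 0:  # Top-left
--                     corner = min(quadrant_points, key=lambda p: p[0] + p[1])
--                 elif x_min == w//2 and y_min == 0:  # Top-right
--                     corner = min(quadrant_points, key=lambda p: (w - p[0]) + p[1])
--                 elif x_min == 0 and y_min == h//2:  # Bottom-left
--                     corner = min(quadrant_points, key=lambda p: p[0] + (h - p[1]))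
--                 else:  # Bottom-right
--                     corner = min(quadrant_points, key=lambda p: (w - p[0]) + (h - p[1]))
--                 corners.append(corner)
--
--         return corners
--     else:
--         # Just return the intersections we have
--         return intersections
-- ===== SOURCE B (Python) =====
-- from typing import List, Tuple
--
-- def _find_court_corners_relaxed(intersections: List[Tuple[int, int]],
--                                 frame_shape: Tuple[int, ...]) -> List[Tuple[int, int]]:
--     """Single pass: bucket each in-frame point into its screen quadrant and keep
--     the point with the strictly smallest corner-distance key (first seen wins)."""
--     if len(intersections) < 2:
--         return intersections
--
--     h, w = frame_shape[:2]
--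
--     if len(intersections) < 4:
--         return intersections
--
--     best = [None, None, None, None]  # TL, TR, BL, BR: (key, point)
--     for x, y in intersections:
--         if not (0 <= x < w and 0 <= y < h):
--             continue
--         left = x < w // 2
--         top = y < h // 2
--         q = (0 if left else 1) + (0 if top else 2)
--         key = (x if left else w - x) + (y if top else h - y)
--         if best[q] is None or key < best[q][0]:
--             best[q] = (key, (x, y))
--
--     return [b[1] for b in best if b is not None]
-- ===== Notes on version B (the rewrite author's own statement) =====
-- stated objective: alternative
-- what changed: Replaces the four per-quadrant filter-then-min passes with a single pass over the intersections that buckets each in-frame point by quadrant and keeps a running strict-minimum per quadrant.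
import Mathlib
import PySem

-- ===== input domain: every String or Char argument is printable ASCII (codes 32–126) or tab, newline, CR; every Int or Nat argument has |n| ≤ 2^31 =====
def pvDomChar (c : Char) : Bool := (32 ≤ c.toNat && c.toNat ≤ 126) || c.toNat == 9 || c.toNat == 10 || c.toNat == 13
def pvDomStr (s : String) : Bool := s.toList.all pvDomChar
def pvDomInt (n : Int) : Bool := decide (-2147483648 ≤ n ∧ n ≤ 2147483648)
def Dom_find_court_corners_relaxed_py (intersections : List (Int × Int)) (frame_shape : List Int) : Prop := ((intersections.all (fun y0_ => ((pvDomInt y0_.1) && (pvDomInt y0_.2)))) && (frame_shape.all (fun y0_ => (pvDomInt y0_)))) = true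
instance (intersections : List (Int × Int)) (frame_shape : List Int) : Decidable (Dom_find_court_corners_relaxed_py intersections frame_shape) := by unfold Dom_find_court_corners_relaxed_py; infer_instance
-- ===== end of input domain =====

-- B replaces A's four filter-then-min quadrant passes by one pass over the intersections
-- keeping a strict running minimum per quadrant (objective: alternative, same asymptotic cost).

-- ===== PORT A =====
-- loop body of A's `for x_min, x_max, y_min, y_max in quadrants:`;
-- `min(..., key=...)` is Python's first-wins minimum = PySem.List.min?;
-- the `none` branch is Python's `if quadrant_points:` guard (min? = none ↔ empty list)
def pvQuadStep (intersections : List (Int × Int)) (w h : Int)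
    (corners : List (Int × Int)) (q : Int × Int × Int × Int) : List (Int × Int) :=
  let xmin := q.1; let xmax := q.2.1; let ymin := q.2.2.1; let ymax := q.2.2.2
  let qp := intersections.filter (fun p =>
    decide (xmin ≤ p.1 ∧ p.1 < xmax ∧ ymin ≤ p.2 ∧ p.2 < ymax))
  let key : Int × Int → Int :=
    if xmin = 0 ∧ ymin = 0 then fun p => p.1 + p.2
    else if xmin = PySem.Int.floordiv w 2 ∧ ymin = 0 then fun p => (w - p.1) + p.2
    else if xmin = 0 ∧ ymin = PySem.Int.floordiv h 2 then fun p => p.1 + (h - p.2)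
    else fun p => (w - p.1) + (h - p.2)
  match PySem.List.min? qp key with
  | some c => corners ++ [c]
  | none => corners

def find_court_corners_relaxed_py (intersections : List (Int × Int)) (frame_shape : List Int) : List (Int × Int) :=
  if intersections.length < 2 then intersections else
  match frame_shape with
  | h :: w :: _ =>
    if 4 ≤ intersections.length then
      let quadrants : List (Int × Int × Int × Int) :=
        [(0, PySem.Int.floordiv w 2, 0, PySem.Int.floordiv h 2),
         (PySem.Int.floordiv w 2, w, 0, PySem.Int.floordiv h 2),
         (0, PySem.Int.floordiv w 2, PySem.Int.floordiv h 2, h),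
         (PySem.Int.floordiv w 2, w, PySem.Int.floordiv h 2, h)]
      quadrants.foldl (pvQuadStep intersections w h) []
    else intersections
  | _ => []   -- unreachable under Pre_: Python raises ValueError unpacking frame_shape[:2]

-- ===== PORT B =====
-- `best[q] is None or key < best[q][0]` update (first seen wins on ties)
def pvBest (o : Option (Int × Int × Int)) (k : Int) (p : Int × Int) : Option (Int × Int × Int) :=
  match o with
  | none => some (k, p)
  | some b => if k < b.1 then some (k, p) else some b

-- one loop iteration of B: skip out-of-frame points, bucket by quadrant, update that minimum
def pvStepB (w h : Int)
    (st : Option (Int × Int × Int) × Option (Int × Int × Int) × Option (Int × Int × Int) × Option (Int × Int × Int))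
    (p : Int × Int) :
    Option (Int × Int × Int) × Option (Int × Int × Int) × Option (Int × Int × Int) × Option (Int × Int × Int) :=
  if 0 ≤ p.1 ∧ p.1 < w ∧ 0 ≤ p.2 ∧ p.2 < h then
    let left := p.1 < PySem.Int.floordiv w 2
    let top := p.2 < PySem.Int.floordiv h 2
    let k := (if left then p.1 else w - p.1) + (if top then p.2 else h - p.2)
    if left then
      if top then (pvBest st.1 k p, st.2.1, st.2.2.1, st.2.2.2)
      else (st.1, st.2.1, pvBest st.2.2.1 k p, st.2.2.2)
    else
      if top then (st.1, pvBest st.2.1 k p, st.2.2.1, st.2.2.2)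
      else (st.1, st.2.1, st.2.2.1, pvBest st.2.2.2 k p)
  else st

def find_court_corners_relaxed_py_alt (intersections : List (Int × Int)) (frame_shape : List Int) : List (Int × Int) :=
  if intersections.length < 2 then intersections else
  match frame_shape with
  | h :: rest =>
    match rest with
    | w :: _ =>
      if intersections.length < 4 then intersections
      else
        let st := intersections.foldl (pvStepB w h) (none, none, none, none)
        [st.1, st.2.1, st.2.2.1, st.2.2.2].filterMap (fun o => o.map (fun b => b.2))
    | [] => intersections   -- unreachable under Pre_: Python raises ValueError unpacking frame_shape[:2]
  | [] => intersections   -- unreachable under Pre_: Python raises ValueError unpacking frame_shape[:2]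

-- ===== PRECONDITION & SPEC =====
-- Pre_ excludes exactly the inputs on which Python A raises: with ≥ 2 intersections,
-- `h, w = frame_shape[:2]` needs frame_shape to have at least 2 entries.
def Pre_find_court_corners_relaxed_py (intersections : List (Int × Int)) (frame_shape : List Int) : Prop :=
  intersections.length < 2 ∨ 2 ≤ frame_shape.length
instance (intersections : List (Int × Int)) (frame_shape : List Int) : Decidable (Pre_find_court_corners_relaxed_py intersections frame_shape) := by unfold Pre_find_court_corners_relaxed_py; infer_instance
def pvWitness_find_court_corners_relaxed_py : (List (Int × Int)) × List Int :=
  ([(1, 1), (8, 1), (1, 8), (8, 8)], [10, 10])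
def Spec_find_court_corners_relaxed_py (intersections : List (Int × Int)) (frame_shape : List Int) (out : List (Int × Int)) : Prop := out = find_court_corners_relaxed_py_alt intersections frame_shape
instance (intersections : List (Int × Int)) (frame_shape : List Int) (out : List (Int × Int)) : Decidable (Spec_find_court_corners_relaxed_py intersections frame_shape out) := by unfold Spec_find_court_corners_relaxed_py; infer_instance

-- ===== CLAIM (what is proved, stated in full; the proofs are below) =====
def Claim_equal_find_court_corners_relaxed_py : Prop := ∀ (intersections : List (Int × Int)) (frame_shape : List Int), Dom_find_court_corners_relaxed_py intersections frame_shape → Pre_find_court_corners_relaxed_py intersections frame_shape → Spec_find_court_corners_relaxed_py intersections frame_shape (find_court_corners_relaxed_py intersections frame_shape)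

-- ===== LEMMAS AND PROOFS =====

-- quadrant membership tests, as B's loop determines them (in frame, then halves)
def pvInTL (w h : Int) (p : Int × Int) : Bool :=
  decide (0 ≤ p.1 ∧ p.1 < w ∧ 0 ≤ p.2 ∧ p.2 < h ∧ p.1 < PySem.Int.floordiv w 2 ∧ p.2 < PySem.Int.floordiv h 2)
def pvInTR (w h : Int) (p : Int × Int) : Bool :=
  decide (0 ≤ p.1 ∧ p.1 < w ∧ 0 ≤ p.2 ∧ p.2 < h ∧ ¬ p.1 < PySem.Int.floordiv w 2 ∧ p.2 < PySem.Int.floordiv h 2)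
def pvInBL (w h : Int) (p : Int × Int) : Bool :=
  decide (0 ≤ p.1 ∧ p.1 < w ∧ 0 ≤ p.2 ∧ p.2 < h ∧ p.1 < PySem.Int.floordiv w 2 ∧ ¬ p.2 < PySem.Int.floordiv h 2)
def pvInBR (w h : Int) (p : Int × Int) : Bool :=
  decide (0 ≤ p.1 ∧ p.1 < w ∧ 0 ≤ p.2 ∧ p.2 < h ∧ ¬ p.1 < PySem.Int.floordiv w 2 ∧ ¬ p.2 < PySem.Int.floordiv h 2)

def pvKTL (w h : Int) (p : Int × Int) : Int := p.1 + p.2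
def pvKTR (w h : Int) (p : Int × Int) : Int := (w - p.1) + p.2
def pvKBL (w h : Int) (p : Int × Int) : Int := p.1 + (h - p.2)
def pvKBR (w h : Int) (p : Int × Int) : Int := (w - p.1) + (h - p.2)

def pvUpd (inQ : Int × Int → Bool) (k : Int × Int → Int)
    (o : Option (Int × Int × Int)) (p : Int × Int) : Option (Int × Int × Int) :=
  if inQ p then pvBest o (k p) p else o

def pvMinStep (k : Int × Int → Int) (acc : Option (Int × Int)) (x : Int × Int) : Option (Int × Int) :=
  match acc with
  | none => some x
  | some m => if k x < k m then some x else some m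

theorem pvMin?_eq_foldl (l : List (Int × Int)) (k : Int × Int → Int) :
    PySem.List.min? l k = l.foldl (pvMinStep k) none := by
  unfold PySem.List.min?
  congr 1
  funext acc x
  cases acc <;> rfl

theorem pvStepB_components (w h : Int) (a b c d : Option (Int × Int × Int)) (p : Int × Int) :
    pvStepB w h (a, b, c, d) p =
      (pvUpd (pvInTL w h) (pvKTL w h) a p, pvUpd (pvInTR w h) (pvKTR w h) b p,
       pvUpd (pvInBL w h) (pvKBL w h) c p, pvUpd (pvInBR w h) (pvKBR w h) d p) := by
  simp only [pvStepB, pvUpd, pvInTL, pvInTR, pvInBL, pvInBR, pvKTL, pvKTR, pvKBL, pvKBR]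
  by_cases hx0 : 0 ≤ p.1 <;> by_cases hxw : p.1 < w <;>
  by_cases hy0 : 0 ≤ p.2 <;> by_cases hyh : p.2 < h <;>
  by_cases hl : p.1 < w / 2 <;>
  by_cases ht : p.2 < h / 2 <;>
  simp [hx0, hxw, hy0, hyh, hl, ht]

theorem pvFold_split (w h : Int) (l : List (Int × Int))
    (a b c d : Option (Int × Int × Int)) :
    l.foldl (pvStepB w h) (a, b, c, d) =
      (l.foldl (pvUpd (pvInTL w h) (pvKTL w h)) a, l.foldl (pvUpd (pvInTR w h) (pvKTR w h)) b,
       l.foldl (pvUpd (pvInBL w h) (pvKBL w h)) c, l.foldl (pvUpd (pvInBR w h) (pvKBR w h)) d) := by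
  induction l generalizing a b c d with
  | nil => rfl
  | cons p t ih => rw [List.foldl_cons, pvStepB_components, List.foldl_cons, List.foldl_cons,
      List.foldl_cons, List.foldl_cons, ih]

theorem pvFold_upd_eq_min_aux (inQ : Int × Int → Bool) (k : Int × Int → Int)
    (l : List (Int × Int)) (o : Option (Int × Int)) :
    l.foldl (pvUpd inQ k) (o.map (fun m => (k m, m))) =
      ((l.filter inQ).foldl (pvMinStep k) o).map (fun m => (k m, m)) := by
  induction l generalizing o with
  | nil => rfl
  | cons p t ih =>
    rw [List.foldl_cons]
    by_cases hq : inQ p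
    · have h1 : pvUpd inQ k (o.map (fun m => (k m, m))) p =
          ((pvMinStep k o p).map (fun m => (k m, m))) := by
        cases o with
        | none => simp [pvUpd, hq, pvBest, pvMinStep]
        | some m =>
          simp only [pvUpd, hq, if_true, Option.map_some, pvBest, pvMinStep]
          by_cases hlt : k p < k m <;> simp [hlt]
      rw [h1, List.filter_cons_of_pos hq, List.foldl_cons]
      exact ih (pvMinStep k o p)
    · have h1 : pvUpd inQ k (o.map (fun m => (k m, m))) p = o.map (fun m => (k m, m)) := by
        simp [pvUpd, hq]
      rw [h1, ih, List.filter_cons_of_neg hq]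

theorem pvFold_upd_eq_min (inQ : Int × Int → Bool) (k : Int × Int → Int) (l : List (Int × Int)) :
    l.foldl (pvUpd inQ k) none =
      (PySem.List.min? (l.filter inQ) k).map (fun m => (k m, m)) := by
  have := pvFold_upd_eq_min_aux inQ k l none
  simpa [pvMin?_eq_foldl] using this

-- the first-wins minimum is invariant under shifting the key by a constant on all members
theorem pvMin?_shift (l : List (Int × Int)) (k1 k2 : Int × Int → Int) (c : Int)
    (hk : ∀ p ∈ l, k1 p = k2 p + c) :
    PySem.List.min? l k1 = PySem.List.min? l k2 := by
  rw [pvMin?_eq_foldl, pvMin?_eq_foldl]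
  have main : ∀ (t : List (Int × Int)) (o : Option (Int × Int)),
      (∀ p ∈ t, k1 p = k2 p + c) → (∀ m, o = some m → k1 m = k2 m + c) →
      t.foldl (pvMinStep k1) o = t.foldl (pvMinStep k2) o := by
    intro t
    induction t with
    | nil => intro o _ _; rfl
    | cons p r ih =>
      intro o ht ho
      rw [List.foldl_cons, List.foldl_cons]
      have hp : k1 p = k2 p + c := ht p (List.mem_cons_self ..)
      have hstep : pvMinStep k1 o p = pvMinStep k2 o p := by
        cases o with
        | none => rfl
        | some m =>
          have hm := ho m rfl
          simp only [pvMinStep]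
          by_cases hlt : k2 p < k2 m
          · have h1 : k1 p < k1 m := by omega
            simp [h1, hlt]
          · have h1 : ¬ k1 p < k1 m := by omega
            simp [h1, hlt]
      rw [hstep]
      refine ih (pvMinStep k2 o p) (fun q hq => ht q (List.mem_cons_of_mem _ hq)) ?_
      intro m hm
      cases o with
      | none => simp [pvMinStep] at hm; subst hm; exact hp
      | some m0 =>
        simp only [pvMinStep] at hm
        by_cases hlt : k2 p < k2 m0
        · simp [hlt] at hm; subst hm; exact hp
        · simp [hlt] at hm; subst hm; exact ho m0 rfl
  exact main l none hk (by intro m hm; cases hm)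

-- emit an optional corner
def pvSeg (o : Option (Int × Int)) : List (Int × Int) :=
  match o with
  | some c => [c]
  | none => []

theorem pvFloordiv2_bracket (w : Int) :
    2 * PySem.Int.floordiv w 2 ≤ w ∧ w < 2 * PySem.Int.floordiv w 2 + 2 := by
  have h := (PySem.Int.floordiv_eq_iff_of_pos (a := w) (b := 2) (q := PySem.Int.floordiv w 2)
    (by norm_num)).mp rfl
  omega

-- A's quadrant filters equal B's quadrant membership tests
theorem pvQuadTL (w h : Int) (l : List (Int × Int)) :
    l.filter (fun p => decide ((0:Int) ≤ p.1 ∧ p.1 < PySem.Int.floordiv w 2 ∧ (0:Int) ≤ p.2 ∧ p.2 < PySem.Int.floordiv h 2)) =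
      l.filter (pvInTL w h) := by
  have hbw := pvFloordiv2_bracket w
  have hbh := pvFloordiv2_bracket h
  refine List.filter_congr ?_
  intro p _
  simp only [pvInTL, decide_eq_decide]
  omega

theorem pvQuadTR (w h : Int) (l : List (Int × Int)) :
    l.filter (fun p => decide (PySem.Int.floordiv w 2 ≤ p.1 ∧ p.1 < w ∧ (0:Int) ≤ p.2 ∧ p.2 < PySem.Int.floordiv h 2)) =
      l.filter (pvInTR w h) := by
  have hbw := pvFloordiv2_bracket w
  have hbh := pvFloordiv2_bracket h
  refine List.filter_congr ?_
  intro p _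
  simp only [pvInTR, decide_eq_decide]
  omega

theorem pvQuadBL (w h : Int) (l : List (Int × Int)) :
    l.filter (fun p => decide ((0:Int) ≤ p.1 ∧ p.1 < PySem.Int.floordiv w 2 ∧ PySem.Int.floordiv h 2 ≤ p.2 ∧ p.2 < h)) =
      l.filter (pvInBL w h) := by
  have hbw := pvFloordiv2_bracket w
  have hbh := pvFloordiv2_bracket h
  refine List.filter_congr ?_
  intro p _
  simp only [pvInBL, decide_eq_decide]
  omega

theorem pvQuadBR (w h : Int) (l : List (Int × Int)) :
    l.filter (fun p => decide (PySem.Int.floordiv w 2 ≤ p.1 ∧ p.1 < w ∧ PySem.Int.floordiv h 2 ≤ p.2 ∧ p.2 < h)) =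
      l.filter (pvInBR w h) := by
  have hbw := pvFloordiv2_bracket w
  have hbh := pvFloordiv2_bracket h
  refine List.filter_congr ?_
  intro p _
  simp only [pvInBR, decide_eq_decide]
  omega

-- A selects its corner by `min` over the quadrant's filtered points; B maintains the
-- same first-wins minimum.  When w//2 = 0 or h//2 = 0 A's branch tests pick another
-- key, but on such a degenerate frame the quadrant pins x (resp. y) to 0, so the two
-- keys differ by a constant and select the same point (pvMin?_shift).
theorem pvMatchSeg (l : List (Int × Int)) (k : Int × Int → Int) (corners : List (Int × Int)) :
    (match PySem.List.min? l k with
     | some c => corners ++ [c]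
     | none => corners) = corners ++ pvSeg (PySem.List.min? l k) := by
  cases PySem.List.min? l k <;> simp [pvSeg]

theorem pvCornerTL (w h : Int) (l : List (Int × Int)) :
    pvQuadStep l w h [] (0, PySem.Int.floordiv w 2, 0, PySem.Int.floordiv h 2) =
      pvSeg ((PySem.List.min? (l.filter (pvInTL w h)) (pvKTL w h))) := by
  simp only [pvQuadStep, pvQuadTL, and_self, if_true]
  rw [pvMatchSeg]
  simp only [List.nil_append]
  rfl

theorem pvCornerTR (w h : Int) (l : List (Int × Int)) :
    pvQuadStep l w h [] (PySem.Int.floordiv w 2, w, 0, PySem.Int.floordiv h 2) =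
      pvSeg ((PySem.List.min? (l.filter (pvInTR w h)) (pvKTR w h))) := by
  have hbw := pvFloordiv2_bracket w
  simp only [pvQuadStep, pvQuadTR, and_true, if_true]
  by_cases hw2 : PySem.Int.floordiv w 2 = (0:Int)
  · have hshift : PySem.List.min? (l.filter (pvInTR w h)) (fun p => p.1 + p.2) =
        PySem.List.min? (l.filter (pvInTR w h)) (pvKTR w h) := by
      refine pvMin?_shift _ _ _ (-w) ?_
      intro p hp
      have := (List.mem_filter.mp hp).2
      simp only [pvInTR, decide_eq_true_eq] at this
      simp only [pvKTR]
      omega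
    rw [if_pos hw2, pvMatchSeg, hshift]
    simp only [List.nil_append]
  · rw [if_neg hw2, pvMatchSeg]
    simp only [List.nil_append]
    rfl

theorem pvCornerBL (w h : Int) (l : List (Int × Int)) :
    pvQuadStep l w h [] (0, PySem.Int.floordiv w 2, PySem.Int.floordiv h 2, h) =
      pvSeg ((PySem.List.min? (l.filter (pvInBL w h)) (pvKBL w h))) := by
  have hbh := pvFloordiv2_bracket h
  simp only [pvQuadStep, pvQuadBL, true_and, if_true]
  by_cases hh2 : PySem.Int.floordiv h 2 = (0:Int)
  · have hshift : PySem.List.min? (l.filter (pvInBL w h)) (fun p => p.1 + p.2) =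
        PySem.List.min? (l.filter (pvInBL w h)) (pvKBL w h) := by
      refine pvMin?_shift _ _ _ (-h) ?_
      intro p hp
      have := (List.mem_filter.mp hp).2
      simp only [pvInBL, decide_eq_true_eq] at this
      simp only [pvKBL]
      omega
    rw [if_pos hh2, pvMatchSeg, hshift]
    simp only [List.nil_append]
  · rw [if_neg hh2,
      if_neg (show ¬ ((0:Int) = PySem.Int.floordiv w 2 ∧ PySem.Int.floordiv h 2 = 0) from
        fun hc => hh2 hc.2),
      pvMatchSeg]
    simp only [List.nil_append]
    rfl

theorem pvCornerBR (w h : Int) (l : List (Int × Int)) :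
    pvQuadStep l w h [] (PySem.Int.floordiv w 2, w, PySem.Int.floordiv h 2, h) =
      pvSeg ((PySem.List.min? (l.filter (pvInBR w h)) (pvKBR w h))) := by
  have hbw := pvFloordiv2_bracket w
  have hbh := pvFloordiv2_bracket h
  simp only [pvQuadStep, pvQuadBR, true_and, and_true]
  by_cases hw2 : PySem.Int.floordiv w 2 = (0:Int) <;>
  by_cases hh2 : PySem.Int.floordiv h 2 = (0:Int)
  · have hshift : PySem.List.min? (l.filter (pvInBR w h)) (fun p => p.1 + p.2) =
        PySem.List.min? (l.filter (pvInBR w h)) (pvKBR w h) := by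
      refine pvMin?_shift _ _ _ (-(w + h)) ?_
      intro p hp
      have := (List.mem_filter.mp hp).2
      simp only [pvInBR, decide_eq_true_eq] at this
      simp only [pvKBR]
      omega
    rw [if_pos (show PySem.Int.floordiv w 2 = 0 ∧ PySem.Int.floordiv h 2 = 0 from ⟨hw2, hh2⟩),
      pvMatchSeg, hshift]
    simp only [List.nil_append]
  · have hshift : PySem.List.min? (l.filter (pvInBR w h)) (fun p => p.1 + (h - p.2)) =
        PySem.List.min? (l.filter (pvInBR w h)) (pvKBR w h) := by
      refine pvMin?_shift _ _ _ (-w) ?_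
      intro p hp
      have := (List.mem_filter.mp hp).2
      simp only [pvInBR, decide_eq_true_eq] at this
      simp only [pvKBR]
      omega
    rw [if_neg (show ¬ (PySem.Int.floordiv w 2 = 0 ∧ PySem.Int.floordiv h 2 = 0) from
        fun hc => hh2 hc.2),
      if_neg hh2, if_pos hw2, pvMatchSeg, hshift]
    simp only [List.nil_append]
  · have hshift : PySem.List.min? (l.filter (pvInBR w h)) (fun p => (w - p.1) + p.2) =
        PySem.List.min? (l.filter (pvInBR w h)) (pvKBR w h) := by
      refine pvMin?_shift _ _ _ (-h) ?_
      intro p hp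
      have := (List.mem_filter.mp hp).2
      simp only [pvInBR, decide_eq_true_eq] at this
      simp only [pvKBR]
      omega
    rw [if_neg (show ¬ (PySem.Int.floordiv w 2 = 0 ∧ PySem.Int.floordiv h 2 = 0) from
        fun hc => hw2 hc.1),
      if_pos hh2, pvMatchSeg, hshift]
    simp only [List.nil_append]
  · rw [if_neg (show ¬ (PySem.Int.floordiv w 2 = 0 ∧ PySem.Int.floordiv h 2 = 0) from
        fun hc => hw2 hc.1),
      if_neg hh2, if_neg hw2, pvMatchSeg]
    simp only [List.nil_append]
    rfl

-- appending further quadrant results after an accumulated list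
theorem pvQuadStep_acc (intersections : List (Int × Int)) (w h : Int)
    (corners : List (Int × Int)) (q : Int × Int × Int × Int) :
    pvQuadStep intersections w h corners q = corners ++ pvQuadStep intersections w h [] q := by
  simp only [pvQuadStep]
  rw [pvMatchSeg, pvMatchSeg]
  simp

theorem pvSeg_map (k : Int × Int → Int) (o : Option (Int × Int)) :
    (Option.map (fun b => (b : Int × Int × Int).2) (o.map (fun m => (k m, m)))) = o := by
  cases o <;> rfl

-- ===== VERDICT (by name: the statement is the Claim_ definition above) =====
theorem find_court_corners_relaxed_py_spec : Claim_equal_find_court_corners_relaxed_py := by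
  intro intersections frame_shape _ hpre
  unfold Spec_find_court_corners_relaxed_py find_court_corners_relaxed_py find_court_corners_relaxed_py_alt
  by_cases hlen2 : intersections.length < 2
  · simp [hlen2]
  · simp only [hlen2, if_false]
    match frame_shape, hpre with
    | [], hpre => exact absurd (hpre.resolve_left hlen2) (by simp)
    | [x], hpre => exact absurd (hpre.resolve_left hlen2) (by simp)
    | h :: w :: rest, _ =>
      by_cases hlen4 : 4 ≤ intersections.length
      · have hlt : ¬ intersections.length < 4 := by omega
        simp only [hlen4, if_true, hlt, if_false]
        rw [pvFold_split]
        simp only [List.foldl_cons, List.foldl_nil]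
        rw [pvQuadStep_acc, pvQuadStep_acc, pvQuadStep_acc]
        rw [pvCornerTL, pvCornerTR, pvCornerBL, pvCornerBR]
        rw [pvFold_upd_eq_min, pvFold_upd_eq_min, pvFold_upd_eq_min, pvFold_upd_eq_min]
        simp only [List.filterMap_cons, List.filterMap_nil, pvSeg_map]
        cases PySem.List.min? (intersections.filter (pvInTL w h)) (pvKTL w h) <;>
        cases PySem.List.min? (intersections.filter (pvInTR w h)) (pvKTR w h) <;>
        cases PySem.List.min? (intersections.filter (pvInBL w h)) (pvKBL w h) <;>
        cases PySem.List.min? (intersections.filter (pvInBR w h)) (pvKBR w h) <;>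
        simp [pvSeg]
      · have hlt : intersections.length < 4 := by omega
        simp [hlen4, hlt]
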